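-- pv_equiv track=rewrite | github.com/anonymous-sub-repo-2026/project-cvpr26 | nli/question_rewrite.py | _split_subject_predicate
-- ===== SOURCE A (Python) =====
-- from typing import List, Tuple
--
-- _NEGATIONS = {"not", "never"}
--
-- def _is_likely_verb(token: str) -> bool:
--     low = token.lower()
--     if not low:
--         return False
--     if low in {
--         "is", "are", "was", "were", "be", "being", "been", "do", "does", "did", "have", "has", "had",
--         "can", "could", "should", "would", "will", "shall", "may", "might", "must",
--     }:
--         return True
--     if low.endswith(("ed", "ing", "en")):
--         return True
--     if low.endswith(("ify", "ise", "ize", "ate", "fy")):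
--         return True
--     if low.endswith("s") and len(low) > 2 and low[-2] != low[-1]:
--         return True
--     return False
--
-- def _split_subject_predicate(tokens: List[str]) -> Tuple[List[str], List[str]]:
--     subj: List[str] = []
--     pred: List[str] = []
--     verb_found = False
--     for tok in tokens:
--         low = tok.lower()
--         if not verb_found:
--             if low in _NEGATIONS:
--                 verb_found = True
--             elif _is_likely_verb(tok):
--                 verb_found = True
--         (pred if verb_found else subj).append(tok)
--     if not pred and subj:
--         pred.append(subj.pop())
--     return subj, pred
-- ===== SOURCE B (Python) =====
-- from typing import List, Tuple
--
-- _NEGATIONS = {"not", "never"}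
--
-- _AUXILIARIES = frozenset({
--     "is", "are", "was", "were", "be", "being", "been", "do", "does", "did", "have", "has", "had",
--     "can", "could", "should", "would", "will", "shall", "may", "might", "must",
-- })
--
-- _VERB_SUFFIXES = ("ed", "ing", "en", "ify", "ise", "ize", "ate", "fy")
--
-- def _is_trigger(low: str) -> bool:
--     if low in _NEGATIONS or low in _AUXILIARIES:
--         return True
--     if any(low.endswith(suf) for suf in _VERB_SUFFIXES):
--         return True
--     return len(low) > 2 and low.endswith("s") and low[-2] != low[-1]
--
-- def _split_subject_predicate(tokens: List[str]) -> Tuple[List[str], List[str]]: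
--     # right-to-left scan: a trigger token absorbs everything collected after it into the
--     # predicate, so the split settles at the FIRST (leftmost) trigger.  Both buffers are
--     # kept in reverse order so every step is an O(1)/amortized-O(1) append.
--     subj_rev: List[str] = []
--     pred_rev: List[str] = []
--     for tok in reversed(tokens):
--         if _is_trigger(tok.lower()):
--             pred_rev.extend(subj_rev)
--             pred_rev.append(tok)
--             subj_rev = []
--         else:
--             subj_rev.append(tok)
--     subj = subj_rev[::-1]
--     pred = pred_rev[::-1]
--     if not pred and subj:
--         pred.append(subj.pop())
--     return subj, pred
-- ===== Notes on version B (the rewrite author's own statement) =====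
-- stated objective: alternative
-- what changed: Replaces A's forward flag-and-append loop by a right-to-left scan in which each trigger token (negation or likely verb) absorbs all tokens collected after it into the predicate, so the split settles at the leftmost trigger; buffers are kept reversed for O(1) appends, the trigger test is restructured into one predicate over the lowercased token with a merged suffix table, and the same last-token fixup is kept.
import Mathlib
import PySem

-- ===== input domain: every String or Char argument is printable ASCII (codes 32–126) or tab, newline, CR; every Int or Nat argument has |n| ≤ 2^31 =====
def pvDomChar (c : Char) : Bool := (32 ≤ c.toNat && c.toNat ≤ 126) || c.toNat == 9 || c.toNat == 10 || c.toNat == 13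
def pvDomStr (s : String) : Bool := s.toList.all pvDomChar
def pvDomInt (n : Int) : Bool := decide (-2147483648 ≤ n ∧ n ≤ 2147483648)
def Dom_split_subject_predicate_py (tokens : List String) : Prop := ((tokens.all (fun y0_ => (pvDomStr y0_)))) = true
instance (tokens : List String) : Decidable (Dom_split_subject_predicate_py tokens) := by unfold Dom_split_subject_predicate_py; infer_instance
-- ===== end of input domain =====

-- B replaces A's forward flag-and-append loop by a right-to-left scan in which a trigger token absorbs everything after it into the predicate (objective: alternative algorithm; same result, different traversal order).


-- ===== PORT A =====
-- _NEGATIONS = {"not", "never"} (only membership-tested: order irrelevant)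
def pvNegations : List (List Char) := ["not".toList, "never".toList]

-- the verb-form set literal in _is_likely_verb (A) / _AUXILIARIES (B): only membership-tested
def pvVerbSet : List (List Char) :=
  ["is".toList, "are".toList, "was".toList, "were".toList, "be".toList, "being".toList,
   "been".toList, "do".toList, "does".toList, "did".toList, "have".toList, "has".toList,
   "had".toList, "can".toList, "could".toList, "should".toList, "would".toList,
   "will".toList, "shall".toList, "may".toList, "might".toList, "must".toList]

-- _is_likely_verb, step for step (low[-2] != low[-1] via pyGet?, reached only under len > 2 so both are some)
def isLikelyVerb (token : String) : Bool :=
  let low := PySem.Chars.lower token.toList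
  if low.isEmpty then false
  else if pvVerbSet.contains low then true
  else if PySem.Chars.endswith low "ed".toList || PySem.Chars.endswith low "ing".toList
          || PySem.Chars.endswith low "en".toList then true
  else if PySem.Chars.endswith low "ify".toList || PySem.Chars.endswith low "ise".toList
          || PySem.Chars.endswith low "ize".toList || PySem.Chars.endswith low "ate".toList
          || PySem.Chars.endswith low "fy".toList then true
  else if PySem.Chars.endswith low "s".toList && decide (2 < low.length)
          && decide (PySem.List.pyGet? low (-2) ≠ PySem.List.pyGet? low (-1)) then true
  else false

-- the shared final fixup 'if not pred and subj: pred.append(subj.pop())' (identical line in both Pythons)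
def pvFix (subj pred : List String) : List String × List String :=
  if pred.isEmpty then
    match subj.getLast? with
    | some x => (subj.dropLast, [x])
    | none => (subj, pred)
  else (subj, pred)

def split_subject_predicate_py (tokens : List String) : List String × List String :=
  let st := tokens.foldl
    (fun (st : List String × List String × Bool) tok =>
      let subj := st.1; let pred := st.2.1; let verbFound := st.2.2
      let low := PySem.Chars.lower tok.toList
      let verbFound :=
        if !verbFound then
          if pvNegations.contains low then true
          else if isLikelyVerb tok then true
          else verbFound
        else verbFound
      if verbFound then (subj, pred ++ [tok], verbFound) else (subj ++ [tok], pred, verbFound))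
    ([], [], false)
  pvFix st.1 st.2.1

-- ===== PORT B =====
-- _VERB_SUFFIXES in Source B
def pvVerbSuffixes : List (List Char) :=
  ["ed".toList, "ing".toList, "en".toList, "ify".toList, "ise".toList, "ize".toList,
   "ate".toList, "fy".toList]

-- _is_trigger(low) in Source B, step for step
def pvIsTrigger (low : List Char) : Bool :=
  if pvNegations.contains low || pvVerbSet.contains low then true
  else if pvVerbSuffixes.any (fun suf => PySem.Chars.endswith low suf) then true
  else decide (2 < low.length) && PySem.Chars.endswith low "s".toList
        && decide (PySem.List.pyGet? low (-2) ≠ PySem.List.pyGet? low (-1))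

-- the reversed loop of Source B: a trigger token absorbs subj-so-far into pred;
-- both buffers are kept in reverse order (st = (subj_rev, pred_rev)) and reversed at the end
def split_subject_predicate_py_alt (tokens : List String) : List String × List String :=
  let st := tokens.reverse.foldl
    (fun (st : List String × List String) tok =>
      if pvIsTrigger (PySem.Chars.lower tok.toList) then (([] : List String), (st.2 ++ st.1) ++ [tok])
      else (st.1 ++ [tok], st.2))
    ([], [])
  pvFix st.1.reverse st.2.reverse

-- ===== PRECONDITION & SPEC =====
def Spec_split_subject_predicate_py (tokens : List String) (out : List String × List String) : Prop := out = split_subject_predicate_py_alt tokens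
instance (tokens : List String) (out : List String × List String) : Decidable (Spec_split_subject_predicate_py tokens out) := by unfold Spec_split_subject_predicate_py; infer_instance

-- ===== CLAIM (what is proved, stated in full; the proofs are below) =====
def Claim_equal_split_subject_predicate_py : Prop := ∀ (tokens : List String), Dom_split_subject_predicate_py tokens → Spec_split_subject_predicate_py tokens (split_subject_predicate_py tokens)

-- ===== LEMMAS AND PROOFS =====

-- A's trigger condition, named for the lemmas
def pvTrig (tok : String) : Bool :=
  pvNegations.contains (PySem.Chars.lower tok.toList) || isLikelyVerb tok

-- A's loop body, named for the lemmas
def pvStep (st : List String × List String × Bool) (tok : String) : List String × List String × Bool :=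
  let subj := st.1; let pred := st.2.1; let verbFound := st.2.2
  let low := PySem.Chars.lower tok.toList
  let verbFound :=
    if !verbFound then
      if pvNegations.contains low then true
      else if isLikelyVerb tok then true
      else verbFound
    else verbFound
  if verbFound then (subj, pred ++ [tok], verbFound) else (subj ++ [tok], pred, verbFound)

-- B's loop body, named for the lemmas
def pvStepB (st : List String × List String) (tok : String) : List String × List String :=
  if pvIsTrigger (PySem.Chars.lower tok.toList) then (([] : List String), (st.2 ++ st.1) ++ [tok])
  else (st.1 ++ [tok], st.2)

-- the two trigger predicates agree on every token
lemma pvTrigger_eq (tok : String) :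
    pvIsTrigger (PySem.Chars.lower tok.toList) = pvTrig tok := by
  unfold pvIsTrigger pvTrig isLikelyVerb
  generalize PySem.Chars.lower tok.toList = low
  rcases low with _ | ⟨c, cs⟩
  · decide
  · simp only [List.isEmpty_cons, Bool.false_eq_true,
      pvVerbSuffixes, List.any_cons, List.any_nil, Bool.or_false]
    generalize pvNegations.contains (c :: cs) = a1
    generalize pvVerbSet.contains (c :: cs) = a2
    generalize PySem.Chars.endswith (c :: cs) "ed".toList = b1
    generalize PySem.Chars.endswith (c :: cs) "ing".toList = b2
    generalize PySem.Chars.endswith (c :: cs) "en".toList = b3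
    generalize PySem.Chars.endswith (c :: cs) "ify".toList = b4
    generalize PySem.Chars.endswith (c :: cs) "ise".toList = b5
    generalize PySem.Chars.endswith (c :: cs) "ize".toList = b6
    generalize PySem.Chars.endswith (c :: cs) "ate".toList = b7
    generalize PySem.Chars.endswith (c :: cs) "fy".toList = b8
    generalize PySem.Chars.endswith (c :: cs) "s".toList = b9
    generalize decide (2 < (c :: cs).length) = d1
    generalize decide (PySem.List.pyGet? (c :: cs) (-2) ≠ PySem.List.pyGet? (c :: cs) (-1)) = d2
    revert a1 a2 b1 b2 b3 b4 b5 b6 b7 b8 b9 d1 d2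
    decide

lemma pvStep_true (subj pred : List String) (tok : String) :
    pvStep (subj, pred, true) tok = (subj, pred ++ [tok], true) := rfl

lemma pvStep_false (subj pred : List String) (tok : String) :
    pvStep (subj, pred, false) tok =
      if pvTrig tok then (subj, pred ++ [tok], true) else (subj ++ [tok], pred, false) := by
  simp only [pvStep, pvTrig]
  by_cases h1 : PySem.Chars.lower tok.toList ∈ pvNegations <;>
    by_cases h2 : isLikelyVerb tok <;> simp [h1, h2]

-- once the flag is set everything goes to pred
lemma pvFoldl_true (ts : List String) : ∀ subj pred,
    ts.foldl pvStep (subj, pred, true) = (subj, pred ++ ts, true) := by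
  induction ts with
  | nil => simp
  | cons t ts ih => intro subj pred; simp [List.foldl_cons, pvStep_true, ih]

-- before the flag is set, A's loop is take/drop at the first trigger index
lemma pvFoldl_false (ts : List String) : ∀ subj,
    (ts.foldl pvStep (subj, [], false)).1 = subj ++ ts.take ((ts.findIdx? pvTrig).getD ts.length) ∧
    (ts.foldl pvStep (subj, [], false)).2.1 = ts.drop ((ts.findIdx? pvTrig).getD ts.length) := by
  induction ts with
  | nil => simp
  | cons t ts ih =>
    intro subj
    by_cases h : pvTrig t
    · simp [List.foldl_cons, pvStep_false, h, List.findIdx?_cons, pvFoldl_true]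
    · have := ih (subj ++ [t])
      simp only [List.foldl_cons, pvStep_false, h]
      rcases hf : ts.findIdx? pvTrig with _ | j
      · simp [List.findIdx?_cons, h, hf, this.1, this.2]
      · simp [List.findIdx?_cons, h, hf, this.1, this.2]

-- B's reversed loop, read as a foldr, holds the reversed take/drop at the first trigger
lemma pvFoldrB (ts : List String) :
    ts.foldr (fun tok st => pvStepB st tok) ([], []) =
      ((ts.take ((ts.findIdx? pvTrig).getD ts.length)).reverse,
       (ts.drop ((ts.findIdx? pvTrig).getD ts.length)).reverse) := by
  induction ts with
  | nil => simp
  | cons t ts ih =>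
    rw [List.foldr_cons, ih]
    by_cases h : pvTrig t
    · have h' : pvIsTrigger (PySem.Chars.lower t.toList) = true := by rw [pvTrigger_eq]; exact h
      simp [pvStepB, h', List.findIdx?_cons, h, ← List.reverse_append, List.take_append_drop]
    · have h' : pvIsTrigger (PySem.Chars.lower t.toList) = false := by rw [pvTrigger_eq]; simpa using h
      rcases hf : ts.findIdx? pvTrig with _ | j
      · simp [pvStepB, h', List.findIdx?_cons, h, hf]
      · simp [pvStepB, h', List.findIdx?_cons, h, hf]

-- ===== VERDICT (by name: the statement is the Claim_ definition above) =====
theorem split_subject_predicate_py_spec : Claim_equal_split_subject_predicate_py := by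
  intro tokens _
  unfold Spec_split_subject_predicate_py split_subject_predicate_py split_subject_predicate_py_alt
  have hA := pvFoldl_false tokens []
  have hB := pvFoldrB tokens
  show pvFix (tokens.foldl pvStep ([], [], false)).1 (tokens.foldl pvStep ([], [], false)).2.1 =
       pvFix (tokens.reverse.foldl pvStepB ([], [])).1.reverse (tokens.reverse.foldl pvStepB ([], [])).2.reverse
  rw [List.foldl_reverse, hB, hA.1, hA.2]; simp
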